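-- pv_equiv track=rewrite | github.com/Perpalicious/steak-over-a-fire | thumbnails.py | _pick_srcset
-- ===== SOURCE A (Python) =====
-- from typing import Any, Dict, Iterable, List, Optional, Tuple
--
-- def _pick_srcset(srcset: str) -> Optional[str]:
--     candidates = []
--     for entry in srcset.split(","):
--         parts = entry.strip().split()
--         if not parts:
--             continue
--         url = parts[0]
--         size = 0
--         if len(parts) > 1 and parts[1].endswith("w"):
--             try:
--                 size = int(parts[1].rstrip("w"))
--             except ValueError:
--                 size = 0
--         candidates.append((size, url))
--     if not candidates:
--         return None
--     return max(candidates, key=lambda item: item[0])[1]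
-- ===== SOURCE B (Python) =====
-- def _entry_width(parts):
--     if len(parts) > 1 and parts[1].endswith("w"):
--         try:
--             return int(parts[1].rstrip("w"))
--         except ValueError:
--             return 0
--     return 0
--
--
-- def _pick_srcset(srcset):
--     entries = [entry.strip().split() for entry in srcset.split(",")]
--     candidates = [(_entry_width(parts), parts[0]) for parts in entries if parts]
--     ranked = sorted(candidates, key=lambda c: c[0], reverse=True)
--     return ranked[0][1] if ranked else None
-- ===== Notes on version B (the rewrite author's own statement) =====
-- stated objective: alternative
-- what changed: B replaces A's accumulate-then-max scan by a staged comprehension pipeline that ranks all parsed candidates with a stable descending sort and returns the head (stable reverse sort preserves max()'s first-winner tie-break).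
import Mathlib
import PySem

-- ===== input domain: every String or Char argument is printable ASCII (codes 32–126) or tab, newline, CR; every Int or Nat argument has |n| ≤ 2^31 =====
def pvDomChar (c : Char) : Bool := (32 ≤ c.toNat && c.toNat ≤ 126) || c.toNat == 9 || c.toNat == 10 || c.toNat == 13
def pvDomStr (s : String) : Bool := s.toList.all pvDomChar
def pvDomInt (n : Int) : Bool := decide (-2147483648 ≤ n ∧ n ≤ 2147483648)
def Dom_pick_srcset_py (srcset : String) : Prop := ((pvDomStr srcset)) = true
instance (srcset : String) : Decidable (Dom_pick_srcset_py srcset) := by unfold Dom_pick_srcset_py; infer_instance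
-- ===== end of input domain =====

-- B replaces A's accumulate-then-max() loop by a staged comprehension pipeline: parse all entries,
-- rank the candidates with a stable descending sort, return the head; same return value.

-- hand port of s.rstrip("w") (strip all trailing 'w' characters); exact: "w" is a single ASCII char
def rstripW (cs : List Char) : List Char := (cs.reverse.dropWhile (· == 'w')).reverse

-- ===== PORT A =====
-- loop body of A's 'for entry in srcset.split(",")', accumulating the candidates list
def pickStepA (candidates : List (Int × String)) (entry : String) : List (Int × String) :=
  match PySem.Str.split₀ (PySem.Str.strip entry) with
  | [] => candidates
  | url :: rest =>
    let size : Int :=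
      match rest with
      | [] => 0
      | p1 :: _ =>
        if PySem.Str.endswith p1 "w" then (PySem.Int.ofChars? (rstripW p1.toList)).getD 0 else 0
    candidates ++ [(size, url)]

def pick_srcset_py (srcset : String) : Option String :=
  let candidates := ((PySem.Str.split? srcset ",").getD []).foldl pickStepA []
  if candidates.isEmpty then none
  else (PySem.List.max? candidates (fun item => item.1)).map (fun best => best.2)

-- ===== PORT B =====
-- port of B's '_entry_width(parts)' (the try/except int('…w') width, 0 on failure)
def entryWidth (parts : List String) : Int :=
  match parts with
  | _ :: w1 :: _ =>
    if PySem.Str.endswith w1 "w" then (PySem.Int.ofChars? (rstripW w1.toList)).getD 0 else 0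
  | _ => 0

def pick_srcset_py_alt (srcset : String) : Option String :=
  let entries := ((PySem.Str.split? srcset ",").getD []).map
      (fun entry => PySem.Str.split₀ (PySem.Str.strip entry))
  -- 'parts[0]' is guarded by 'if parts' in the comprehension, so headD never uses its default
  let candidates := (entries.filter (fun parts => !parts.isEmpty)).map
      (fun parts => (entryWidth parts, parts.headD ""))
  let ranked := PySem.List.sorted candidates (fun c => c.1) true
  match ranked with
  | [] => none
  | best :: _ => some best.2

-- ===== PRECONDITION & SPEC =====
def Spec_pick_srcset_py (srcset : String) (out : Option String) : Prop := out = pick_srcset_py_alt srcset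
instance (srcset : String) (out : Option String) : Decidable (Spec_pick_srcset_py srcset out) := by unfold Spec_pick_srcset_py; infer_instance

-- ===== CLAIM =====
def Claim_equal_pick_srcset_py : Prop := ∀ (srcset : String), Dom_pick_srcset_py srcset → Spec_pick_srcset_py srcset (pick_srcset_py srcset)

-- ===== LEMMAS AND PROOFS =====

-- the candidate one entry contributes (common to both programs)
def candOf (entry : String) : Option (Int × String) :=
  match PySem.Str.split₀ (PySem.Str.strip entry) with
  | [] => none
  | w0 :: rest =>
    some (match rest with
      | [] => (0 : Int)
      | w1 :: _ =>
        if PySem.Str.endswith w1 "w" then (PySem.Int.ofChars? (rstripW w1.toList)).getD 0 else 0,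
      w0)

-- the step of max? with key (·.1)
def maxStep (m : Option (Int × String)) (c : Int × String) : Option (Int × String) :=
  match m with
  | none => some c
  | some b => if b.1 < c.1 then some c else some b

lemma stepA_eq (acc : List (Int × String)) (e : String) :
    pickStepA acc e = match candOf e with | none => acc | some c => acc ++ [c] := by
  unfold pickStepA candOf
  cases PySem.Str.split₀ (PySem.Str.strip e) with
  | nil => rfl
  | cons w0 rest => cases rest <;> rfl

lemma foldA (entries : List String) (acc : List (Int × String)) :
    entries.foldl pickStepA acc = acc ++ entries.filterMap candOf := by
  induction entries generalizing acc with
  | nil => simp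
  | cons e es ih =>
    rw [List.foldl_cons, ih, stepA_eq, List.filterMap_cons]
    cases candOf e <;> simp

-- B's staged pipeline produces exactly the candidate list
lemma pipeline_eq (es : List String) :
    ((es.map (fun entry => PySem.Str.split₀ (PySem.Str.strip entry))).filter
        (fun parts => !parts.isEmpty)).map (fun parts => (entryWidth parts, parts.headD ""))
      = es.filterMap candOf := by
  induction es with
  | nil => rfl
  | cons e es ih =>
    rw [List.map_cons, List.filterMap_cons]
    cases h : PySem.Str.split₀ (PySem.Str.strip e) with
    | nil =>
      have hc : candOf e = none := by unfold candOf; rw [h]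
      rw [hc, List.filter_cons_of_neg (by simp)]
      exact ih
    | cons w0 rest =>
      have hc : candOf e = some (entryWidth (w0 :: rest), w0) := by
        unfold candOf entryWidth
        rw [h]
        cases rest <;> rfl
      rw [hc, List.filter_cons_of_pos (by simp), List.map_cons, List.headD_cons, ih]

-- inserting into any list moves the head exactly as the running-max step does
lemma head?_insertBy (x : Int × String) (acc : List (Int × String)) :
    (PySem.List.insertBy (fun a b => decide ((fun c => c.1) b < (fun c => c.1) a)) x acc).head?
      = maxStep acc.head? x := by
  cases acc with
  | nil => rfl
  | cons y ys =>
    unfold PySem.List.insertBy maxStep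
    by_cases h : y.1 < x.1 <;> simp [h]

-- the head of the reverse-sorted list is the running max (max?'s fold)
lemma head?_foldl_insertBy (xs : List (Int × String)) (acc : List (Int × String)) :
    (xs.foldl (fun a x => PySem.List.insertBy (fun a b => decide ((fun c => c.1) b < (fun c => c.1) a)) x a) acc).head?

      = xs.foldl maxStep acc.head? := by
  induction xs generalizing acc with
  | nil => rfl
  | cons x xs ih => rw [List.foldl_cons, List.foldl_cons, ih, head?_insertBy]

lemma max?_eq_head_sorted_rev (xs : List (Int × String)) :
    (PySem.List.sorted xs (fun c => c.1) true).head? = PySem.List.max? xs (fun item => item.1) := by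
  rw [PySem.List.sorted_rev_eq_foldl_insertBy]
  unfold PySem.List.max?
  rw [head?_foldl_insertBy]
  congr 1
  funext m c
  cases m <;> rfl

-- ===== VERDICT =====
theorem pick_srcset_py_spec : Claim_equal_pick_srcset_py := by
  intro srcset _
  unfold Spec_pick_srcset_py pick_srcset_py pick_srcset_py_alt
  simp only [foldA, List.nil_append, pipeline_eq]
  cases h : PySem.List.sorted (((PySem.Str.split? srcset ",").getD []).filterMap candOf) (fun c => c.1) true with
  | nil =>
    have : ((PySem.Str.split? srcset ",").getD []).filterMap candOf = [] :=
      (PySem.List.sorted_eq_nil_iff _ _ _).mp h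
    simp [this]
  | cons best tl =>
    have hne : ((PySem.Str.split? srcset ",").getD []).filterMap candOf ≠ [] := by
      intro hnil
      rw [hnil] at h
      simp [PySem.List.sorted] at h
    have hmax := max?_eq_head_sorted_rev (((PySem.Str.split? srcset ",").getD []).filterMap candOf)
    rw [h] at hmax
    simp [List.isEmpty_iff, hne, ← hmax]
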